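-- pv_equiv track=rewrite | github.com/Zoltun456/Archipelago-BG3-ToT | src/apworld/bg3tot/trials_data.py | progressive_shop_section_indices
-- ===== SOURCE A (Python) =====
-- def progressive_shop_section_indices(total_shop_unlocks: int, fragment_count: int) -> list[int]:
--     if total_shop_unlocks <= 0:
--         return []
--     if fragment_count <= 0:
--         return [0 for _index in range(total_shop_unlocks)]
--     return [
--         min(fragment_count, ((index - 1) * fragment_count // total_shop_unlocks) + 1)
--         for index in range(1, total_shop_unlocks + 1)
--     ]
-- ===== SOURCE B (Python) =====
-- def progressive_shop_section_indices(total_shop_unlocks: int, fragment_count: int) -> list[int]: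
--     if total_shop_unlocks <= 0:
--         return []
--     if fragment_count <= 0:
--         return [0] * total_shop_unlocks
--     res = []
--     prev = 0
--     while prev < total_shop_unlocks:
--         v = prev * fragment_count // total_shop_unlocks + 1
--         nxt = (v * total_shop_unlocks + fragment_count - 1) // fragment_count
--         res.extend([v] * (nxt - prev))
--         prev = nxt
--     return res
-- ===== Notes on version B (the rewrite author's own statement) =====
-- stated objective: alternative
-- what changed: Builds the list run-by-run: a while loop emits one [v]*count run per occurring section value, advancing between ceiling-division boundaries, instead of computing min(fc,(i-1)*fc//n+1) separately for each of the n indices; the min cap disappears because it never binds.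
import Mathlib
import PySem

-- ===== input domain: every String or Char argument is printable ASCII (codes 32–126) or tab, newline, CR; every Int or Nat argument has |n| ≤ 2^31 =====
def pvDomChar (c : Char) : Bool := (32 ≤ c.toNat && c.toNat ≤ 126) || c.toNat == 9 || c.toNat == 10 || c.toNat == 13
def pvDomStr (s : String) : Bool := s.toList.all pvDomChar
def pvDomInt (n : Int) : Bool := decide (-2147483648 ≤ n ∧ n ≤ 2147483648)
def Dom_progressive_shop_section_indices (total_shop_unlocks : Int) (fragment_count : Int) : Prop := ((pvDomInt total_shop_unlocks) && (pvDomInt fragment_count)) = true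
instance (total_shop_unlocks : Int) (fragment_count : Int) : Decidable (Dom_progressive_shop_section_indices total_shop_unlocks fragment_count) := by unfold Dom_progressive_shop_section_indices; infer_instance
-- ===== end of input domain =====

-- B builds the output run-by-run (one [v]*count run per occurring section value, bounds from
-- ceiling division) instead of computing min per index; alternative decomposition, same values.

-- ===== PORT A =====
def progressive_shop_section_indices (total_shop_unlocks : Int) (fragment_count : Int) : List Int :=
  if total_shop_unlocks ≤ 0 then []
  else if fragment_count ≤ 0 then
    (PySem.List.pyRange 0 total_shop_unlocks 1).map (fun _ => 0)
  else
    (PySem.List.pyRange 1 (total_shop_unlocks + 1) 1).map (fun index =>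
      min fragment_count
        (PySem.Int.floordiv ((index - 1) * fragment_count) total_shop_unlocks + 1))

-- ===== PORT B =====
-- while loop of Source B, fuel-totalized (fuel only makes the recursion total; at the call site
-- fuel = total_shop_unlocks.toNat always suffices, since prev strictly increases each pass)
def pvLoop (n : Int) (fc : Int) : Nat → List Int → Int → List Int
  | 0, res, _ => res
  | Nat.succ fuel, res, prev =>
    if prev < n then
      let v := PySem.Int.floordiv (prev * fc) n + 1
      let nxt := PySem.Int.floordiv (v * n + fc - 1) fc
      pvLoop n fc fuel (res ++ PySem.List.pyRepeat [v] (nxt - prev)) nxt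
    else res

def progressive_shop_section_indices_alt (total_shop_unlocks : Int) (fragment_count : Int) : List Int :=
  if total_shop_unlocks ≤ 0 then []
  else if fragment_count ≤ 0 then
    PySem.List.pyRepeat [0] total_shop_unlocks
  else
    pvLoop total_shop_unlocks fragment_count total_shop_unlocks.toNat [] 0

-- ===== PRECONDITION & SPEC =====
def Spec_progressive_shop_section_indices (total_shop_unlocks : Int) (fragment_count : Int) (out : List Int) : Prop := out = progressive_shop_section_indices_alt total_shop_unlocks fragment_count
instance (total_shop_unlocks : Int) (fragment_count : Int) (out : List Int) : Decidable (Spec_progressive_shop_section_indices total_shop_unlocks fragment_count out) := by unfold Spec_progressive_shop_section_indices; infer_instance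

-- ===== CLAIM (what is proved, stated in full; the proofs are below) =====
def Claim_equal_progressive_shop_section_indices : Prop := ∀ (total_shop_unlocks : Int) (fragment_count : Int), Dom_progressive_shop_section_indices total_shop_unlocks fragment_count → Spec_progressive_shop_section_indices total_shop_unlocks fragment_count (progressive_shop_section_indices total_shop_unlocks fragment_count)

-- ===== LEMMAS AND PROOFS =====

-- the run boundary c v = ceil(v*n/fc), as Source B computes it
def pvC (n fc v : Int) : Int := PySem.Int.floordiv (v * n + fc - 1) fc

lemma pvC_le_iff (n fc : Int) (hfc : 0 < fc) (v k : Int) :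
    pvC n fc v ≤ k ↔ v * n ≤ k * fc := by
  have h : pvC n fc v ≤ k ↔ pvC n fc v < k + 1 := by omega
  rw [h, pvC, PySem.Int.floordiv_lt_iff_lt_mul hfc]
  constructor <;> intro h' <;> nlinarith

-- A's per-index value, for index - 1 = k
def pvF (n fc k : Int) : Int := min fc (PySem.Int.floordiv (k * fc) n + 1)

-- inside the run of value v (which spans (v-1)*n ≤ k*fc, k < pvC v), A's value is v
lemma pv_value (n fc : Int) (hn : 0 < n) (hfc : 0 < fc) (v k : Int)
    (hv2 : v ≤ fc) (h1 : (v - 1) * n ≤ k * fc) (h2 : k < pvC n fc v) :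
    pvF n fc k = v := by
  have h2' : ¬ (v * n ≤ k * fc) := by
    intro h
    exact absurd ((pvC_le_iff n fc hfc v k).mpr h) (by omega)
  have h3 : PySem.Int.floordiv (k * fc) n = v - 1 := by
    rw [PySem.Int.floordiv_eq_iff_of_pos hn]
    constructor
    · exact h1
    · nlinarith
  rw [pvF, h3]
  omega

-- main invariant: with enough fuel, the loop appends A's values for indices prev..n-1
lemma pv_loop (n fc : Int) (hn : 0 < n) (hfc : 0 < fc) :
    ∀ (fuel : Nat) (res : List Int) (prev : Int), 0 ≤ prev → (n - prev).toNat ≤ fuel →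
    pvLoop n fc fuel res prev = res ++ (PySem.List.pyRange prev n 1).map (pvF n fc) := by
  intro fuel
  induction fuel with
  | zero =>
    intro res prev _ hfuel
    rw [pvLoop, PySem.List.pyRange_one_eq_nil (by omega)]
    simp
  | succ fuel ih =>
    intro res prev hprev hfuel
    rw [pvLoop]
    by_cases hlt : prev < n
    · simp only [hlt, if_true]
      set v := PySem.Int.floordiv (prev * fc) n + 1 with hv
      have hfl : (v - 1) * n ≤ prev * fc ∧ prev * fc < (v - 1 + 1) * n := by
        have := (PySem.Int.floordiv_eq_iff_of_pos hn
          (a := prev * fc) (q := PySem.Int.floordiv (prev * fc) n)).mp rfl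
        simpa [hv] using this
      have hv1 : 1 ≤ v := by
        have h0 : (0 : Int) ≤ prev * fc := mul_nonneg hprev (by omega)
        nlinarith [hfl.2]
      have hv2 : v ≤ fc := by
        by_contra h
        have : fc ≤ v - 1 := by omega
        nlinarith [hfl.1, hlt]
      have hnext1 : prev < pvC n fc v := by
        by_contra h
        have := (pvC_le_iff n fc hfc v prev).mp (by omega)
        nlinarith [hfl.2]
      have hnext2 : pvC n fc v ≤ n := by
        rw [pvC_le_iff n fc hfc]
        nlinarith
      rw [show PySem.Int.floordiv (v * n + fc - 1) fc = pvC n fc v from rfl]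
      rw [ih _ (pvC n fc v) (by omega) (by omega)]
      rw [PySem.List.pyRange_one_append prev (pvC n fc v) n (by omega) hnext2]
      rw [List.map_append, List.append_assoc]
      congr 2
      rw [PySem.List.pyRepeat_singleton]
      symm
      apply List.eq_replicate_iff.mpr
      constructor
      · rw [List.length_map, PySem.List.length_pyRange_one]
      · intro b hb
        simp only [List.mem_map] at hb
        obtain ⟨k, hk, rfl⟩ := hb
        rw [PySem.List.mem_pyRange_one] at hk
        apply pv_value n fc hn hfc v k hv2 _ hk.2
        calc (v - 1) * n ≤ prev * fc := hfl.1
          _ ≤ k * fc := by nlinarith [hk.1]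
    · simp only [hlt, if_false]
      rw [PySem.List.pyRange_one_eq_nil (by omega)]
      simp

-- A's main branch, re-indexed to k = index - 1
lemma pv_A_eq (n fc : Int) (hn : 0 < n) :
    (PySem.List.pyRange 1 (n + 1) 1).map (fun index =>
        min fc (PySem.Int.floordiv ((index - 1) * fc) n + 1))
      = (PySem.List.pyRange 0 n 1).map (pvF n fc) := by
  rw [PySem.List.pyRange_one, PySem.List.pyRange_one, List.map_map, List.map_map]
  have h1 : (n + 1 - 1).toNat = (n - 0).toNat := by omega
  rw [h1]
  apply List.map_congr_left
  intro k _
  have hk : (1 + (k : Int) - 1) = (0 + (k : Int)) := by ring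
  simp [pvF, hk]

-- ===== VERDICT (by name: the statement is the Claim_ definition above) =====
theorem progressive_shop_section_indices_spec : Claim_equal_progressive_shop_section_indices := by
  intro n fc _
  unfold Spec_progressive_shop_section_indices
  unfold progressive_shop_section_indices progressive_shop_section_indices_alt
  by_cases h1 : n ≤ 0
  · simp [h1]
  · by_cases h2 : fc ≤ 0
    · simp only [h1, h2, if_false, if_true]
      rw [PySem.List.pyRepeat_singleton, PySem.List.pyRange_one]
      rw [List.map_map]
      have : (n - 0).toNat = n.toNat := by omega
      rw [this]
      simp [List.eq_replicate_iff]
    · simp only [h1, h2, if_false]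
      have hn : 0 < n := by omega
      have hfc : 0 < fc := by omega
      rw [pv_A_eq n fc hn]
      rw [pv_loop n fc hn hfc n.toNat [] 0 le_rfl (by omega)]
      simp
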